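-- pv_equiv track=rewrite | github.com/SudaisX/pfun | assignment3/q3.py | unweave
-- ===== SOURCE A (Python) =====
-- def unweave(word):
--     half1 = ''
--     half2 = ''
--     for i in range(0, len(word), 2):
--         half1 += word[i]
--         if i == len(word) or i == len(word) -1 :
--             pass
--         else:
--             half2 += word[i + 1]
--     return half1 + half2
-- ===== SOURCE B (Python) =====
-- def unweave(word):
--     return word[::2] + word[1::2]
-- ===== Notes on version B (the rewrite author's own statement) =====
-- stated objective: faster
-- what changed: Replaced the guarded index loop that grows two strings by repeated quadratic concatenation with the two stride slices word[::2] + word[1::2], eliminating the loop and the end-of-string guard entirely.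
import Mathlib
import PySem

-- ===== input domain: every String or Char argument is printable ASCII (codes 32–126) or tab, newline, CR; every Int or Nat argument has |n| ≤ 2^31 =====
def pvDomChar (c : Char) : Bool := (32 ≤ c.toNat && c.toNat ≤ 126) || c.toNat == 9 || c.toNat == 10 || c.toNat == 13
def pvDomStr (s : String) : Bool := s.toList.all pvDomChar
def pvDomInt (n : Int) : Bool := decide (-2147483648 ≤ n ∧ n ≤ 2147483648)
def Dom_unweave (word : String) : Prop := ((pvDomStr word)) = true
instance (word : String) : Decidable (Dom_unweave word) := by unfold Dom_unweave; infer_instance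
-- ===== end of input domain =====

-- B replaces A's guarded index loop (quadratic repeated string concatenation) by the two stride
-- slices word[::2] + word[1::2]: loop-free and measurably faster, same return value.

-- ===== PORT A =====
-- literal port of A's loop: for i in range(0, len(word), 2): half1 += word[i]; guarded half2 += word[i+1]
def unweave (word : String) : String :=
  let cs := word.toList
  let n : Int := PySem.Str.len word
  let p := (PySem.List.pyRange 0 n 2).foldl
    (fun (st : List Char × List Char) i =>
      let half1 := st.1 ++ [PySem.List.pyGetD cs i ' ']
      let half2 := if i = n ∨ i = n - 1 then st.2
                   else st.2 ++ [PySem.List.pyGetD cs (i + 1) ' ']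
      (half1, half2))
    ([], [])
  String.ofList (p.1 ++ p.2)

-- ===== PORT B =====
-- literal port of B: word[::2] + word[1::2] (slice? is total here since step = 2 ≠ 0; getD [] is the totality guard)
def unweave_alt (word : String) : String :=
  String.ofList (((PySem.List.slice? word.toList none none 2).getD []) ++
             ((PySem.List.slice? word.toList (some 1) none 2).getD []))

-- ===== PRECONDITION & SPEC =====
def Spec_unweave (word : String) (out : String) : Prop := out = unweave_alt word
instance (word : String) (out : String) : Decidable (Spec_unweave word out) := by unfold Spec_unweave; infer_instance

-- ===== CLAIM (what is proved, stated in full; the proofs are below) =====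
def Claim_equal_unweave : Prop := ∀ (word : String), Dom_unweave word → Spec_unweave word (unweave word)

-- ===== LEMMAS AND PROOFS =====

-- the characters at even indices 0,2,4,… / odd indices 1,3,5,…
def takeEvens : List Char → List Char
  | [] => []
  | [a] => [a]
  | a :: _ :: t => a :: takeEvens t

def takeOdds : List Char → List Char
  | [] => []
  | [_] => []
  | _ :: b :: t => b :: takeOdds t

theorem filterMap_even_eq_takeEvens (c : Nat) :
    ∀ cs : List Char, cs.length ≤ 2 * c →
      List.filterMap (fun k => cs[2 * k]?) (List.range c) = takeEvens cs := by
  induction c with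
  | zero => intro cs h; simp at h; simp [h, takeEvens]
  | succ c ih =>
    intro cs h
    match cs with
    | [] => simp [takeEvens]
    | [a] =>
      rw [List.range_succ_eq_map]
      simp [takeEvens, List.filterMap_map, Function.comp]
    | a :: b :: t =>
      rw [List.range_succ_eq_map, List.filterMap_cons, List.filterMap_map]
      have hc : List.filterMap ((fun k => (a :: b :: t)[2 * k]?) ∘ Nat.succ) (List.range c)
           = List.filterMap (fun k => t[2 * k]?) (List.range c) := by
        apply List.filterMap_congr
        intro x _
        show (a :: b :: t)[2 * (x + 1)]? = t[2 * x]?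
        rw [show 2 * (x + 1) = (2 * x) + 1 + 1 by omega]
        simp
      rw [hc, ih t (by simp at h ⊢; omega)]
      simp [takeEvens]
  
theorem filterMap_odd_eq_takeOdds (c : Nat) :
    ∀ cs : List Char, cs.length ≤ 2 * c + 1 →
      List.filterMap (fun k => cs[2 * k + 1]?) (List.range c) = takeOdds cs := by
  induction c with
  | zero =>
    intro cs h
    match cs with
    | [] => simp [takeOdds]
    | [a] => simp [takeOdds]
  | succ c ih =>
    intro cs h
    match cs with
    | [] => simp [takeOdds]
    | [a] =>
      rw [List.range_succ_eq_map]
      simp [takeOdds, List.filterMap_map, Function.comp]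
    | a :: b :: t =>
      rw [List.range_succ_eq_map, List.filterMap_cons, List.filterMap_map]
      have hc : List.filterMap ((fun k => (a :: b :: t)[2 * k + 1]?) ∘ Nat.succ) (List.range c)
           = List.filterMap (fun k => t[2 * k + 1]?) (List.range c) := by
        apply List.filterMap_congr
        intro x _
        show (a :: b :: t)[2 * (x + 1) + 1]? = t[2 * x + 1]?
        rw [show 2 * (x + 1) + 1 = (2 * x + 1) + 1 + 1 by omega]
        simp
      rw [hc, ih t (by simp at h ⊢; omega)]
      simp [takeOdds]

theorem foldl_pair_split (e1 e2 : Int → List Char) (l : List Int) :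
    ∀ x y : List Char,
      l.foldl (fun st i => (st.1 ++ e1 i, st.2 ++ e2 i)) (x, y)
        = (x ++ l.flatMap e1, y ++ l.flatMap e2) := by
  induction l with
  | nil => intro x y; simp
  | cons i l ih => intro x y; simp [ih]

theorem unweave_core (cs : List Char) :
    (List.foldl
        (fun (st : List Char × List Char) (i : Int) =>
          (st.1 ++ [PySem.List.pyGetD cs i ' '],
            if i = (cs.length:Int) ∨ i = (cs.length:Int) - 1 then st.2
            else st.2 ++ [PySem.List.pyGetD cs (i + 1) ' ']))
        ([], []) (PySem.List.pyRange 0 (cs.length:Int) 2)).1 ++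
      (List.foldl
        (fun (st : List Char × List Char) (i : Int) =>
          (st.1 ++ [PySem.List.pyGetD cs i ' '],
            if i = (cs.length:Int) ∨ i = (cs.length:Int) - 1 then st.2
            else st.2 ++ [PySem.List.pyGetD cs (i + 1) ' ']))
        ([], []) (PySem.List.pyRange 0 (cs.length:Int) 2)).2
    = takeEvens cs ++ takeOdds cs := by
  have hbody : (fun (st : List Char × List Char) (i : Int) =>
        (st.1 ++ [PySem.List.pyGetD cs i ' '],
          if i = (cs.length:Int) ∨ i = (cs.length:Int) - 1 then st.2
          else st.2 ++ [PySem.List.pyGetD cs (i + 1) ' ']))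
      = (fun st i => (st.1 ++ [PySem.List.pyGetD cs i ' '],
          st.2 ++ (if i = (cs.length:Int) ∨ i = (cs.length:Int) - 1 then ([]:List Char)
                   else [PySem.List.pyGetD cs (i + 1) ' ']))) := by
    funext st i
    by_cases h : i = (cs.length:Int) ∨ i = (cs.length:Int) - 1 <;> simp [h]
  rw [hbody, foldl_pair_split,
      PySem.List.pyRange_of_pos 0 (cs.length:Int) (by norm_num),
      List.flatMap_map, List.flatMap_map]
  have he : (List.range (if (0:Int) < (cs.length:Int) then (((cs.length:Int) - 0 + 2 - 1) / 2).toNat else 0)).flatMap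
        (fun (k : Nat) => [PySem.List.pyGetD cs (0 + 2 * (k:Int)) ' ']) = takeEvens cs := by
    have hb : cs.length ≤ 2 * (if (0:Int) < (cs.length:Int) then (((cs.length:Int) - 0 + 2 - 1) / 2).toNat else 0) := by
      split_ifs with h0 <;> omega
    have hc : ∀ x ∈ List.range (if (0:Int) < (cs.length:Int) then (((cs.length:Int) - 0 + 2 - 1) / 2).toNat else 0),
        [PySem.List.pyGetD cs (0 + 2 * (x:Int)) ' '] = (cs[2*x]?).toList := by
      intro x hx
      simp only [List.mem_range] at hx
      have hlt : 2 * x < cs.length := by split_ifs at hx with h0 <;> omega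
      rw [show (0:Int) + 2 * (x:Int) = ((2*x : Nat) : Int) by push_cast; ring,
          PySem.List.pyGetD_natCast, List.getD_eq_getElem cs ' ' hlt,
          List.getElem?_eq_getElem hlt]
      rfl
    rw [List.flatMap_congr hc, ← List.filterMap_eq_flatMap_toList, filterMap_even_eq_takeEvens _ cs hb]
  have ho : (List.range (if (0:Int) < (cs.length:Int) then (((cs.length:Int) - 0 + 2 - 1) / 2).toNat else 0)).flatMap
        (fun (k : Nat) => if (0:Int) + 2 * (k:Int) = (cs.length:Int) ∨ (0:Int) + 2 * (k:Int) = (cs.length:Int) - 1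
                  then ([]:List Char) else [PySem.List.pyGetD cs ((0:Int) + 2 * (k:Int) + 1) ' ']) = takeOdds cs := by
    have hb : cs.length ≤ 2 * (if (0:Int) < (cs.length:Int) then (((cs.length:Int) - 0 + 2 - 1) / 2).toNat else 0) + 1 := by
      split_ifs with h0 <;> omega
    have hc : ∀ x ∈ List.range (if (0:Int) < (cs.length:Int) then (((cs.length:Int) - 0 + 2 - 1) / 2).toNat else 0),
        (if (0:Int) + 2 * (x:Int) = (cs.length:Int) ∨ (0:Int) + 2 * (x:Int) = (cs.length:Int) - 1
         then ([]:List Char) else [PySem.List.pyGetD cs ((0:Int) + 2 * (x:Int) + 1) ' ']) = (cs[2*x+1]?).toList := by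
      intro x hx
      simp only [List.mem_range] at hx
      have hlt : 2 * x < cs.length := by split_ifs at hx with h0 <;> omega
      by_cases h : (0:Int) + 2 * (x:Int) = (cs.length:Int) ∨ (0:Int) + 2 * (x:Int) = (cs.length:Int) - 1
      · have hn : cs.length ≤ 2 * x + 1 := by omega
        rw [if_pos h, List.getElem?_eq_none hn]
        rfl
      · have hlt1 : 2 * x + 1 < cs.length := by
          rw [not_or] at h
          omega
        rw [if_neg h,
            show (0:Int) + 2 * (x:Int) + 1 = ((2*x+1 : Nat) : Int) by push_cast; ring,
            PySem.List.pyGetD_natCast, List.getD_eq_getElem cs ' ' hlt1,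
            List.getElem?_eq_getElem hlt1]
        rfl
    rw [List.flatMap_congr hc, ← List.filterMap_eq_flatMap_toList, filterMap_odd_eq_takeOdds _ cs hb]
  rw [he, ho]
  simp

theorem unweave_eq (word : String) :
    unweave word = String.ofList (takeEvens word.toList ++ takeOdds word.toList) := by
  unfold unweave
  simp only [PySem.Str.len_eq]
  exact congrArg String.ofList (unweave_core word.toList)

theorem slice_even (cs : List Char) : (PySem.List.slice? cs none none 2).getD [] = takeEvens cs := by
  simp [PySem.List.slice?, PySem.List.sliceIndices]
  have h1 : ∀ x ∈ List.range (if 0 < cs.length then (((cs.length:Int) + 2 - 1) / 2).toNat else 0),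
      cs[((2:ℤ) * (x:ℤ)).toNat]? = cs[2 * x]? := by
    intro x _
    congr 1
  rw [List.filterMap_congr h1]
  apply filterMap_even_eq_takeEvens
  split_ifs with h <;> omega

theorem slice_odd (cs : List Char) : (PySem.List.slice? cs (some 1) none 2).getD [] = takeOdds cs := by
  match cs with
  | [] => simp [PySem.List.slice?, PySem.List.sliceIndices, takeOdds]
  | a :: t =>
    simp only [PySem.List.slice?, PySem.List.sliceIndices]
    norm_num
    have h1 : ∀ x ∈ List.range (if 0 < t.length then (((t.length:Int) + 2 - 1) / 2).toNat else 0),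
        (a :: t)[((1:ℤ) + 2 * (x:ℤ)).toNat]? = (a :: t)[2 * x + 1]? := by
      intro x _
      congr 1
      omega
    rw [List.filterMap_congr h1]
    apply filterMap_odd_eq_takeOdds
    simp only [List.length_cons]
    split_ifs with h <;> omega

theorem unweave_alt_eq (word : String) :
    unweave_alt word = String.ofList (takeEvens word.toList ++ takeOdds word.toList) := by
  unfold unweave_alt
  rw [slice_even, slice_odd]

-- ===== VERDICT (by name: the statement is the Claim_ definition above) =====
theorem unweave_spec : Claim_equal_unweave := by
  intro word _
  unfold Spec_unweave
  rw [unweave_eq, unweave_alt_eq]
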